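-- pv_equiv track=rewrite | github.com/athuwyl/stockpriceprediction | stockprediction.py | stockPricePrediction
-- ===== SOURCE A (Python) =====
-- def stockPricePrediction(prices):
--     """
--     Returns an array indicating the number of days needed to wait for a higher price.
--
--     :param prices: List[int], the stock prices on each day.
--     :return: List[int], where each element represents the number of days to wait for a higher price.
--     """
--     n = len(prices)
--     answer = [0] * n  # Initialize the answer array with 0s
--     stack = []  # This will store indices of days in a decreasing price order
--
--     for i in range(n):
--         # While stack is not empty and the current price is greater than the price
--         # at the index stored at the top of the stack
--         while stack and prices[i] > prices[stack[-1]]: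
--             prev_day = stack.pop()  # Get the index of the day with a smaller price
--             answer[prev_day] = i - prev_day  # Calculate the difference in days
--         # Push the current index onto the stack
--         stack.append(i)
--
--     # Any remaining indices in the stack will naturally have 0 in the answer array
--     # since there is no future day with a higher price.
--
--     return answer
-- ===== SOURCE B (Python) =====
-- def first_higher(prices, i, stop):
--     """Index of the first day after i (before stop) with a strictly higher price, or None."""
--     for j in range(i + 1, stop):
--         if prices[j] > prices[i]:
--             return j
--     return None
--
--
-- def stockPricePrediction(prices):
--     n = len(prices)
--     answer = []
--     for i in range(n):
--         j = first_higher(prices, i, n)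
--         answer.append(j - i if j is not None else 0)
--     return answer
-- ===== Notes on version B (the rewrite author's own statement) =====
-- stated objective: simpler
-- what changed: Replaced the monotonic index stack with a direct per-day forward scan: for each day i the answer is the distance to the first later day with a strictly higher price, found by a plain inner scan, with no stack and no in-place answer updates.
import Mathlib
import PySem

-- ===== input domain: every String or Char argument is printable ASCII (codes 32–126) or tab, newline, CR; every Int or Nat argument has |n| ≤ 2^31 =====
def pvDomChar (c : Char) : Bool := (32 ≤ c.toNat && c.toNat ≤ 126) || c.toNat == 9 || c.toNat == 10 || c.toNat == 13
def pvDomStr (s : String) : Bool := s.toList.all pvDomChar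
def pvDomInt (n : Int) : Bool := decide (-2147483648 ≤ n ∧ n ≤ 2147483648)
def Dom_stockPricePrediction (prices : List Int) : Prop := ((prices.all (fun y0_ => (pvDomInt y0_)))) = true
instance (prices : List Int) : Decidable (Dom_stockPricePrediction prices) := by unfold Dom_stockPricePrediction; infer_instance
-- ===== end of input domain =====

-- B replaces A's monotonic index stack (with in-place answer updates) by a direct
-- per-day forward scan for the first strictly higher later price: simpler, no stack.

-- ===== PORT A =====
-- A's inner `while stack and prices[i] > prices[stack[-1]]` loop: the stack head is its top.
def pvPop (prices : List Int) (i : Nat) (answer : List Int) : List Nat → List Int × List Nat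
  | [] => (answer, [])
  | t :: rest =>
    if prices.getD i 0 > prices.getD t 0 then
      pvPop prices i (answer.set t ((i : Int) - (t : Int))) rest
    else (answer, t :: rest)

-- body of A's `for i in range(n)` loop: run the while loop, then push i.
def pvStep (prices : List Int) (st : List Int × List Nat) (i : Nat) : List Int × List Nat :=
  let r := pvPop prices i st.1 st.2
  (r.1, i :: r.2)

def stockPricePrediction (prices : List Int) : List Int :=
  ((List.range prices.length).foldl (pvStep prices) (List.replicate prices.length 0, [])).1

-- ===== PORT B =====
-- Source B's first_higher(prices, i, stop): inner for-loop with early return, as find? over the range.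
def pvFirstHigher (prices : List Int) (i stop : Nat) : Option Nat :=
  (List.range' (i + 1) (stop - (i + 1))).find? (fun j => decide (prices.getD i 0 < prices.getD j 0))

def stockPricePrediction_alt (prices : List Int) : List Int :=
  (List.range prices.length).map (fun i =>
    match pvFirstHigher prices i prices.length with
    | some j => (j : Int) - (i : Int)
    | none => 0)

-- ===== PRECONDITION & SPEC =====
def Spec_stockPricePrediction (prices : List Int) (out : List Int) : Prop := out = stockPricePrediction_alt prices
instance (prices : List Int) (out : List Int) : Decidable (Spec_stockPricePrediction prices out) := by unfold Spec_stockPricePrediction; infer_instance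

-- ===== CLAIM (what is proved, stated in full; the proofs are below) =====
def Claim_equal_stockPricePrediction : Prop := ∀ (prices : List Int), Dom_stockPricePrediction prices → Spec_stockPricePrediction prices (stockPricePrediction prices)

-- ===== LEMMAS AND PROOFS =====

-- the value B writes at index j when scanning up to (exclusive) k
def pvEnt (p : List Int) (j k : Nat) : Int :=
  match pvFirstHigher p j k with
  | some l => (l : Int) - (j : Int)
  | none => 0

-- loop invariant of A after the first k iterations
def pvInv (p : List Int) (k : Nat) (s : List Int × List Nat) : Prop :=
  s.1.length = p.length ∧
  (∀ j, j < k → s.1.getD j 0 = pvEnt p j k) ∧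
  (∀ j, k ≤ j → s.1.getD j 0 = 0) ∧
  s.2.Pairwise (· > ·) ∧
  (∀ j, j ∈ s.2 ↔ (j < k ∧ ∀ l, j < l → l < k → p.getD l 0 ≤ p.getD j 0))

lemma pv_getD_set_self (xs : List Int) (t : Nat) (v : Int) (ht : t < xs.length) :
    (xs.set t v).getD t 0 = v := by
  simp [List.getD, ht]

lemma pv_getD_set_ne (xs : List Int) (t j : Nat) (v : Int) (h : j ≠ t) :
    (xs.set t v).getD j 0 = xs.getD j 0 := by
  have h' : t ≠ j := fun e => h e.symm
  simp [List.getD, h']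

lemma pvFirstHigher_none (p : List Int) (j k : Nat)
    (h : ∀ l, j < l → l < k → p.getD l 0 ≤ p.getD j 0) :
    pvFirstHigher p j k = none := by
  unfold pvFirstHigher
  rw [List.find?_eq_none]
  intro x hx
  rw [List.mem_range'_1] at hx
  simp only [decide_eq_true_eq, not_lt]
  exact h x (by omega) (by omega)

lemma pvFirstHigher_succ (p : List Int) (j k : Nat) (hj : j < k) :
    pvFirstHigher p j (k + 1) =
      (pvFirstHigher p j k).or
        (if p.getD j 0 < p.getD k 0 then some k else none) := by
  unfold pvFirstHigher
  have hc : k + 1 - (j + 1) = (k - (j + 1)) + 1 := by omega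
  rw [hc, List.range'_concat, List.find?_append]
  have he : j + 1 + 1 * (k - (j + 1)) = k := by omega
  rw [he]
  congr 1
  by_cases hpk : p.getD j 0 < p.getD k 0
  · rw [if_pos hpk]
    simp only [List.find?, decide_eq_true hpk]
  · rw [if_neg hpk]
    simp only [List.find?, decide_eq_false hpk]

lemma pvEnt_self (p : List Int) (k : Nat) : pvEnt p k (k + 1) = 0 := by
  simp [pvEnt, pvFirstHigher]

-- while-loop lemma: pvPop preserves/establishes the pieces of the invariant
lemma pvPop_spec (p : List Int) (k : Nat) (hk : k < p.length) :
    ∀ (st : List Nat) (ans : List Int),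
    ans.length = p.length →
    st.Pairwise (· > ·) →
    (∀ j ∈ st, j < k ∧ ∀ l, j < l → l < k → p.getD l 0 ≤ p.getD j 0) →
    (∀ j, j < k → j ∉ st → ans.getD j 0 = pvEnt p j (k + 1)) →
    (∀ j ∈ st, ans.getD j 0 = 0) →
    (∀ j, k ≤ j → ans.getD j 0 = 0) →
    (∀ j, j < k → (∀ l, j < l → l < k → p.getD l 0 ≤ p.getD j 0) →
      p.getD k 0 ≤ p.getD j 0 → j ∈ st) →
    (pvPop p k ans st).1.length = p.length ∧
    (pvPop p k ans st).2.Pairwise (· > ·) ∧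
    (∀ j ∈ (pvPop p k ans st).2, j < k ∧ ∀ l, j < l → l < k + 1 → p.getD l 0 ≤ p.getD j 0) ∧
    (∀ j, j < k → j ∉ (pvPop p k ans st).2 → (pvPop p k ans st).1.getD j 0 = pvEnt p j (k + 1)) ∧
    (∀ j ∈ (pvPop p k ans st).2, (pvPop p k ans st).1.getD j 0 = 0) ∧
    (∀ j, k ≤ j → (pvPop p k ans st).1.getD j 0 = 0) ∧
    (∀ j, j < k → (∀ l, j < l → l < k → p.getD l 0 ≤ p.getD j 0) →
      p.getD k 0 ≤ p.getD j 0 → j ∈ (pvPop p k ans st).2) := by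
  intro st
  induction st with
  | nil =>
    intro ans h1 h2 h3 h4 h5 h6 h7
    simp only [pvPop]
    exact ⟨h1, h2, by simp, fun j hj _ => h4 j hj (by simp), by simp, h6,
      fun j hj hp hpk => h7 j hj hp hpk⟩
  | cons t rest ih =>
    intro ans h1 h2 h3 h4 h5 h6 h7
    have ht : t < k := (h3 t (List.mem_cons_self ..)).1
    have tprop := (h3 t (List.mem_cons_self ..)).2
    simp only [pvPop]
    by_cases hc : p.getD k 0 > p.getD t 0
    · rw [if_pos hc]
      apply ih
      · simp [h1]
      · exact (List.pairwise_cons.mp h2).2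
      · exact fun j hj => h3 j (List.mem_cons_of_mem _ hj)
      · intro j hj hnot
        by_cases hjt : j = t
        · subst hjt
          rw [pv_getD_set_self _ _ _ (by rw [h1]; omega)]
          unfold pvEnt
          rw [pvFirstHigher_succ p j k hj, pvFirstHigher_none p j k tprop]
          have hc' : p.getD j 0 < p.getD k 0 := hc
          rw [Option.none_or, if_pos hc']
        · rw [pv_getD_set_ne _ _ _ _ hjt]
          refine h4 j hj ?_
          intro hmem
          rcases List.mem_cons.mp hmem with h' | h'
          · exact hjt h'
          · exact hnot h'
      · intro j hjmem
        have hgt : t > j := (List.pairwise_cons.mp h2).1 j hjmem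
        rw [pv_getD_set_ne _ _ _ _ (by omega)]
        exact h5 j (List.mem_cons_of_mem _ hjmem)
      · intro j hj
        rw [pv_getD_set_ne _ _ _ _ (by omega)]
        exact h6 j hj
      · intro j hj hp hpk
        have := h7 j hj hp hpk
        rcases List.mem_cons.mp this with h' | h'
        · subst h'; exact absurd hc (by omega)
        · exact h'
    · rw [if_neg hc]
      have hle : p.getD k 0 ≤ p.getD t 0 := not_lt.mp hc
      refine ⟨h1, h2, ?_, h4, h5, h6, fun j hj hp hpk => h7 j hj hp hpk⟩
      intro j hjmem
      rcases List.mem_cons.mp hjmem with h' | h'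
      · subst h'
        refine ⟨ht, fun l hl1 hl2 => ?_⟩
        by_cases hlk : l < k
        · exact tprop l hl1 hlk
        · have : l = k := by omega
          subst this; exact hle
      · have hgt : t > j := (List.pairwise_cons.mp h2).1 j h'
        have hjk : j < k := (h3 j (List.mem_cons_of_mem _ h')).1
        have jprop := (h3 j (List.mem_cons_of_mem _ h')).2
        refine ⟨hjk, fun l hl1 hl2 => ?_⟩
        by_cases hlk : l < k
        · exact jprop l hl1 hlk
        · have : l = k := by omega
          subst this
          exact le_trans hle (jprop t hgt ht)

lemma pvStep_inv (p : List Int) (k : Nat) (hk : k < p.length) (s : List Int × List Nat)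
    (h : pvInv p k s) : pvInv p (k + 1) (pvStep p s k) := by
  obtain ⟨h1, h2, h3, h4, h5⟩ := h
  have P := pvPop_spec p k hk s.2 s.1 h1 h4 (fun j hj => (h5 j).mp hj)
    (by
      intro j hj hn
      have hne : pvFirstHigher p j k ≠ none := by
        intro hnone
        apply hn
        refine (h5 j).mpr ⟨hj, ?_⟩
        intro l hl1 hl2
        have hm : l ∈ List.range' (j + 1) (k - (j + 1)) :=
          List.mem_range'_1.mpr ⟨by omega, by omega⟩
        have := List.find?_eq_none.mp hnone l hm
        simpa using this
      cases hsome : pvFirstHigher p j k with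
      | none => exact absurd hsome hne
      | some l =>
        rw [h2 j hj]
        unfold pvEnt
        rw [pvFirstHigher_succ p j k hj, hsome]
        rfl)
    (by
      intro j hjmem
      have hh := (h5 j).mp hjmem
      rw [h2 j hh.1]
      unfold pvEnt
      rw [pvFirstHigher_none p j k hh.2])
    h3
    (fun j hj hp _ => (h5 j).mpr ⟨hj, hp⟩)
  obtain ⟨P1, P2, P3, P4, P5, P6, P7⟩ := P
  refine ⟨P1, ?_, ?_, ?_, ?_⟩
  · intro j hj
    by_cases hjk : j = k
    · show (pvPop p k s.1 s.2).1.getD j 0 = pvEnt p j (k + 1)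
      rw [hjk, pvEnt_self]
      exact P6 k le_rfl
    · have hjlt : j < k := by omega
      show (pvPop p k s.1 s.2).1.getD j 0 = pvEnt p j (k + 1)
      by_cases hmem : j ∈ (pvPop p k s.1 s.2).2
      · rw [P5 j hmem]
        unfold pvEnt
        rw [pvFirstHigher_none p j (k + 1) (P3 j hmem).2]
      · exact P4 j hjlt hmem
  · intro j hj
    exact P6 j (by omega)
  · exact List.pairwise_cons.mpr ⟨fun j hjm => (P3 j hjm).1, P2⟩
  · intro j
    show j ∈ k :: (pvPop p k s.1 s.2).2 ↔ _
    constructor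
    · intro hm
      rcases List.mem_cons.mp hm with he | hm'
      · exact ⟨by omega, fun l hl1 hl2 => absurd hl2 (by omega)⟩
      · exact ⟨Nat.lt_succ_of_lt (P3 j hm').1, (P3 j hm').2⟩
    · rintro ⟨hjk1, hp⟩
      by_cases he : j = k
      · simp [he]
      · have hjk : j < k := by omega
        have hp' : ∀ l, j < l → l < k → p.getD l 0 ≤ p.getD j 0 :=
          fun l a b => hp l a (by omega)
        have hpk : p.getD k 0 ≤ p.getD j 0 := hp k hjk (by omega)
        exact List.mem_cons.mpr (Or.inr (P7 j hjk hp' hpk))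

lemma pvInv_foldl (p : List Int) (k : Nat) (hk : k ≤ p.length) :
    pvInv p k ((List.range k).foldl (pvStep p) (List.replicate p.length 0, [])) := by
  induction k with
  | zero =>
    refine ⟨by simp, fun j hj => absurd hj (by omega), fun j _ => ?_, List.Pairwise.nil, by simp⟩
    simp [List.getD, List.getElem?_replicate]
    split <;> rfl
  | succ k ih =>
    rw [List.range_succ, List.foldl_append]
    exact pvStep_inv p k (by omega) _ (ih (by omega))

theorem stockPricePrediction_eq (p : List Int) :
    stockPricePrediction p = stockPricePrediction_alt p := by
  obtain ⟨h1, h2, -, -, -⟩ := pvInv_foldl p p.length le_rfl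
  unfold stockPricePrediction stockPricePrediction_alt
  apply List.ext_getElem
  · rw [h1]; simp
  · intro i hi1 hi2
    have hi : i < p.length := by rw [h1] at hi1; exact hi1
    rw [← List.getD_eq_getElem _ 0 hi1, h2 i hi, List.getElem_map, List.getElem_range]
    rfl

-- ===== VERDICT (by name: the statement is the Claim_ definition above) =====
theorem stockPricePrediction_spec : Claim_equal_stockPricePrediction := by
  intro prices _
  exact stockPricePrediction_eq prices
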